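-- pv_equiv track=rewrite | github.com/YingXiaoZhou/LDscaff | scripts/form_cycle.py | get_super_scaffold_length
-- ===== SOURCE A (Python) =====
-- def cycle_get_length(path, scaf_lengths):
-- 	valid_nodes = path[:-1]
-- 	power_idx = list(range(0,len(valid_nodes),2))
-- 	power_idx = [i+1 for i in power_idx]
-- 	nodes_sets = [valid_nodes[i] for i in power_idx]
-- 	contig_lengths = []
-- 	contig_lengths = [scaf_lengths[int(i/2)] for i in nodes_sets]
-- 	length_super_scaffold = 100*(int(len(path)/2)-1) + sum(contig_lengths)
-- 	return length_super_scaffold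
--
-- def linear_get_length(path, scaf_lengths):
-- 	valid_nodes = path
-- 	power_idx = list(range(0,len(valid_nodes),2))
-- 	power_idx = [i+1 for i in power_idx]
-- 	nodes_sets = [valid_nodes[i] for i in power_idx]
-- 	contig_lengths = [scaf_lengths[int(i/2)] for i in nodes_sets]
-- 	length_super_scaffold = 100*(int(len(path)/2)-1) + sum(contig_lengths)
-- 	return length_super_scaffold
--
-- def get_super_scaffold_length(paths, scaf_lengths):
-- 	super_scaffold_lengths = []
-- 	for path in paths:
-- 		l = len(path)
-- 		if l%2==0:
-- 			length_super_scaffold = linear_get_length(path, scaf_lengths)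
-- 		else:
-- 			length_super_scaffold = cycle_get_length(path, scaf_lengths)
-- 		super_scaffold_lengths.append(length_super_scaffold)
-- 	return super_scaffold_lengths
-- ===== SOURCE B (Python) =====
-- def get_super_scaffold_length(paths, scaf_lengths):
-- 	out = []
-- 	for path in paths:
-- 		total = -100
-- 		it = iter(path)
-- 		for _left, right in zip(it, it):
-- 			total += 100 + scaf_lengths[int(right / 2)]
-- 		out.append(total)
-- 	return out
-- ===== Notes on version B (the rewrite author's own statement) =====
-- stated objective: simpler
-- what changed: Replaces A's two helper functions, parity branch, slice and three staged index/node/length lists with index-free pairwise iterator consumption (zip(it, it)): a running total starts at -100 and each (left, right) contig pair adds 100 + scaf_lengths[int(right/2)]; a trailing odd node is dropped by the pairing itself, so no linear/cycle split is needed.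
import Mathlib
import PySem

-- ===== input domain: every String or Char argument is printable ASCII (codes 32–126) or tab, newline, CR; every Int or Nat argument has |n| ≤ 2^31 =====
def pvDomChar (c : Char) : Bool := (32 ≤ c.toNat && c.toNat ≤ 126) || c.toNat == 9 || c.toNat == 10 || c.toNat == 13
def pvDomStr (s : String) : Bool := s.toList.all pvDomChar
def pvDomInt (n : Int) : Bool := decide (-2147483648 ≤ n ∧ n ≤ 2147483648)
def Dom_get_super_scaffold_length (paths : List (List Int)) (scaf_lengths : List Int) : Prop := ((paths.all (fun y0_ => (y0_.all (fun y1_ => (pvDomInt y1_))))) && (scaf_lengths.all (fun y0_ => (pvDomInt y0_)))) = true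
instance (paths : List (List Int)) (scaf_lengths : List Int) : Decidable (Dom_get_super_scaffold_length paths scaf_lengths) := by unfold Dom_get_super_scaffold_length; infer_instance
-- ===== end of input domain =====

-- B replaces A's two helpers, parity branch, slice and staged index/node/length lists with
-- index-free pairwise consumption of each path ((left, right) pairs, trailing odd node dropped),
-- accumulating -100 + per-pair (100 + contig length) (objective: simpler).

-- ===== PORT A =====
def cycle_get_length (path : List Int) (scaf_lengths : List Int) : Int :=
  let valid_nodes := PySem.List.slice path none (some (-1))
  let power_idx := PySem.List.pyRange 0 (valid_nodes.length : Int) 2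
  let power_idx := power_idx.map (fun i => i + 1)
  let nodes_sets := power_idx.map (fun i => PySem.List.pyGetD valid_nodes i 0)
  let contig_lengths := nodes_sets.map (fun i => PySem.List.pyGetD scaf_lengths (PySem.Int.truncdiv i 2) 0)
  100 * (PySem.Int.truncdiv (path.length : Int) 2 - 1) + contig_lengths.sum

def linear_get_length (path : List Int) (scaf_lengths : List Int) : Int :=
  let valid_nodes := path
  let power_idx := PySem.List.pyRange 0 (valid_nodes.length : Int) 2
  let power_idx := power_idx.map (fun i => i + 1)
  let nodes_sets := power_idx.map (fun i => PySem.List.pyGetD valid_nodes i 0)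
  let contig_lengths := nodes_sets.map (fun i => PySem.List.pyGetD scaf_lengths (PySem.Int.truncdiv i 2) 0)
  100 * (PySem.Int.truncdiv (path.length : Int) 2 - 1) + contig_lengths.sum

def get_super_scaffold_length (paths : List (List Int)) (scaf_lengths : List Int) : List Int :=
  paths.foldl (fun super_scaffold_lengths path =>
    let l := (path.length : Int)
    let length_super_scaffold :=
      if PySem.Int.mod l 2 = 0 then linear_get_length path scaf_lengths
      else cycle_get_length path scaf_lengths
    super_scaffold_lengths ++ [length_super_scaffold]) []

-- ===== PORT B =====
-- zip(it, it) on one iterator: consecutive disjoint (left, right) pairs, odd leftover dropped.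
def pvZipPairs : List Int → List (Int × Int)
  | a :: b :: rest => (a, b) :: pvZipPairs rest
  | _ => []

def get_super_scaffold_length_alt (paths : List (List Int)) (scaf_lengths : List Int) : List Int :=
  paths.foldl (fun out path =>
    let total := (pvZipPairs path).foldl
      (fun total p => total + (100 + PySem.List.pyGetD scaf_lengths (PySem.Int.truncdiv p.2 2) 0))
      (-100)
    out ++ [total]) []

-- ===== PRECONDITION & SPEC =====
-- Pre_: every contig index A looks up (int(path[i]/2) for each odd position i that A reads,
-- which are exactly the elements of range(1, len(path), 2)) is a valid Python index into
-- scaf_lengths; outside this A raises IndexError.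
def Pre_get_super_scaffold_length (paths : List (List Int)) (scaf_lengths : List Int) : Prop :=
  ∀ path ∈ paths, ∀ i ∈ PySem.List.pyRange 1 (path.length : Int) 2,
    PySem.Raise.InRange scaf_lengths.length (PySem.Int.truncdiv (PySem.List.pyGetD path i 0) 2)

instance (paths : List (List Int)) (scaf_lengths : List Int) : Decidable (Pre_get_super_scaffold_length paths scaf_lengths) := by
  unfold Pre_get_super_scaffold_length PySem.Raise.InRange; infer_instance

def pvWitness_get_super_scaffold_length : List (List Int) × List Int := ([[0, 1], [2, 3, 0]], [5, 7])

def Spec_get_super_scaffold_length (paths : List (List Int)) (scaf_lengths : List Int) (out : List Int) : Prop := out = get_super_scaffold_length_alt paths scaf_lengths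
instance (paths : List (List Int)) (scaf_lengths : List Int) (out : List Int) : Decidable (Spec_get_super_scaffold_length paths scaf_lengths out) := by unfold Spec_get_super_scaffold_length; infer_instance

-- ===== CLAIM (what is proved, stated in full; the proofs are below) =====
def Claim_equal_get_super_scaffold_length : Prop := ∀ (paths : List (List Int)) (scaf_lengths : List Int), Dom_get_super_scaffold_length paths scaf_lengths → Pre_get_super_scaffold_length paths scaf_lengths → Spec_get_super_scaffold_length paths scaf_lengths (get_super_scaffold_length paths scaf_lengths)

-- ===== LEMMAS AND PROOFS =====

-- Per-path agreement, step 1: A's parity-branched helper value equals the odd-index range sum.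
lemma body_eq (path scaf_lengths : List Int) :
    (if PySem.Int.mod (path.length : Int) 2 = 0 then linear_get_length path scaf_lengths
     else cycle_get_length path scaf_lengths)
    = (PySem.List.pyRange 1 (path.length : Int) 2).foldl
        (fun t i => t + PySem.List.pyGetD scaf_lengths (PySem.Int.truncdiv (PySem.List.pyGetD path i 0) 2) 0)
        (100 * (PySem.Int.floordiv (path.length : Int) 2 - 1)) := by
  have hmod : PySem.Int.mod ((path.length : Int)) 2 = ((path.length % 2 : Nat) : Int) := by
    rw [PySem.Int.mod_eq_emod_of_pos (by norm_num)]
    push_cast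
    ring
  have htd : PySem.Int.truncdiv ((path.length : Int)) 2 = PySem.Int.floordiv ((path.length : Int)) 2 := by
    rw [PySem.Int.floordiv_eq_ediv_of_pos (by norm_num)]
    unfold PySem.Int.truncdiv
    rw [Int.tdiv_eq_ediv]
    simp
  rw [PySem.List.foldl_add, PySem.List.pyRange_of_pos 1 ((path.length : Int)) (by norm_num)]
  by_cases he : path.length % 2 = 0
  · rw [hmod, he]
    rw [if_pos (by norm_num)]
    simp only [linear_get_length]
    rw [PySem.List.pyRange_of_pos 0 ((path.length : Int)) (by norm_num), htd]
    simp only [List.map_map]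
    congr 1
    have hc : (if (0:Int) < (path.length : Int) then (((path.length : Int) - 0 + 2 - 1) / 2).toNat else 0)
        = (if (1:Int) < (path.length : Int) then (((path.length : Int) - 1 + 2 - 1) / 2).toNat else 0) := by
      split_ifs <;> omega
    rw [hc]
    apply congrArg List.sum
    apply List.map_congr_left
    intro k _
    simp only [Function.comp]
    have hix : (0:Int) + 2 * (k:Int) + 1 = 1 + 2 * (k:Int) := by ring
    rw [hix]
  · have ho : path.length % 2 = 1 := Nat.mod_two_ne_zero.mp he
    rw [hmod, ho]
    rw [if_neg (by norm_num)]
    simp only [cycle_get_length, PySem.List.slice_to_neg_one]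
    rw [htd]
    have hdl : ((path.dropLast.length : Nat) : Int) = (path.length : Int) - 1 := by
      simp [List.length_dropLast]
      omega
    rw [hdl, PySem.List.pyRange_of_pos 0 ((path.length : Int) - 1) (by norm_num)]
    simp only [List.map_map]
    congr 1
    have hc : (if (0:Int) < (path.length : Int) - 1 then (((path.length : Int) - 1 - 0 + 2 - 1) / 2).toNat else 0)
        = (if (1:Int) < (path.length : Int) then (((path.length : Int) - 1 + 2 - 1) / 2).toNat else 0) := by
      split_ifs <;> omega
    rw [hc]
    set c : Nat := (if (1:Int) < (path.length : Int) then (((path.length : Int) - 1 + 2 - 1) / 2).toNat else 0) with hcdef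
    apply congrArg List.sum
    apply List.map_congr_left
    intro k hk
    have hkc : k < c := List.mem_range.mp hk
    have hcl : 2 * c < path.length := by
      rw [hcdef] at hkc ⊢
      split_ifs at hkc ⊢ <;> omega
    have hb0 : (0:Int) ≤ 0 + 2 * (k:Int) + 1 := by omega
    have hb1 : 0 + 2 * (k:Int) + 1 < (path.dropLast.length : Int) := by
      rw [hdl]; omega
    have hb1' : (1:Int) + 2 * (k:Int) < (path.length : Int) := by omega
    simp only [Function.comp]
    rw [PySem.List.pyGetD_eq_getElem _ _ hb0 hb1,
        PySem.List.pyGetD_eq_getElem _ _ (by omega) hb1']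
    congr 2
    rw [List.getElem_dropLast]
    congr 1
    omega

-- range(1, n+2, 2) peels its first index.
lemma range_two_cons (n : Int) (h : 0 ≤ n) :
    PySem.List.pyRange 1 (n + 2) 2 = 1 :: (PySem.List.pyRange 1 n 2).map (· + 2) := by
  rw [PySem.List.pyRange_of_pos 1 (n + 2) (by norm_num),
      PySem.List.pyRange_of_pos 1 n (by norm_num)]
  have hc : (if (1:Int) < n + 2 then ((n + 2 - 1 + 2 - 1) / 2).toNat else 0)
      = (if (1:Int) < n then ((n - 1 + 2 - 1) / 2).toNat else 0) + 1 := by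
    split_ifs <;> omega
  rw [hc, List.range_succ_eq_map]
  simp only [List.map_cons, List.map_map]
  refine List.cons_eq_cons.mpr ⟨by norm_num, ?_⟩
  apply List.map_congr_left
  intro k _
  simp only [Function.comp]
  push_cast
  ring

-- The right components of the pairs are exactly the odd-position elements.
lemma pairs_snd : ∀ (path : List Int),
    (PySem.List.pyRange 1 (path.length : Int) 2).map (fun i => PySem.List.pyGetD path i 0)
      = (pvZipPairs path).map Prod.snd
  | [] => by decide
  | [a] => by
      have h : PySem.List.pyRange 1 (1 : Int) 2 = [] := by decide
      simp only [List.length_cons, List.length_nil]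
      norm_num [h, pvZipPairs]
  | a :: b :: rest => by
      have h2 : (((a :: b :: rest).length : Nat) : Int) = (rest.length : Int) + 2 := by
        push_cast [List.length_cons]; ring
      rw [h2, range_two_cons _ (by positivity)]
      simp only [List.map_cons, List.map_map, pvZipPairs]
      refine List.cons_eq_cons.mpr ⟨?_, ?_⟩
      · rw [PySem.List.pyGetD_eq_getElem _ _ (by norm_num) (by push_cast [List.length_cons]; omega)]
        rfl
      · rw [← pairs_snd rest]
        apply List.map_congr_left
        intro i hi
        have h1i : 1 ≤ i := by
          have := (PySem.List.mem_pyRange_iff_of_pos (by norm_num : (0:Int) < 2) i).mp hi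
          omega
        simp only [Function.comp]
        rw [PySem.List.pyGetD_of_nonneg _ _ (by omega),
            PySem.List.pyGetD_of_nonneg _ _ (by omega)]
        have : (i + 2).toNat = i.toNat + 2 := by omega
        rw [this]
        rfl

-- Summing (100 + g p) over a list.
lemma sum_hundred_add (l : List (Int × Int)) (g : Int × Int → Int) :
    (l.map (fun p => 100 + g p)).sum = 100 * (l.length : Int) + (l.map g).sum := by
  induction l with
  | nil => simp
  | cons p ps ih => simp [ih]; ring

lemma pairs_length : ∀ (path : List Int), (pvZipPairs path).length = path.length / 2
  | [] => by simp [pvZipPairs]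
  | [_] => by simp [pvZipPairs]
  | a :: b :: rest => by
      simp only [pvZipPairs, List.length_cons, pairs_length rest]
      omega

-- Per-path agreement, step 2: the odd-index range sum equals B's pairwise fold.
lemma body_eq2 (path scaf_lengths : List Int) :
    (PySem.List.pyRange 1 (path.length : Int) 2).foldl
        (fun t i => t + PySem.List.pyGetD scaf_lengths (PySem.Int.truncdiv (PySem.List.pyGetD path i 0) 2) 0)
        (100 * (PySem.Int.floordiv (path.length : Int) 2 - 1))
    = (pvZipPairs path).foldl
        (fun total p => total + (100 + PySem.List.pyGetD scaf_lengths (PySem.Int.truncdiv p.2 2) 0))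
        (-100) := by
  rw [PySem.List.foldl_add, PySem.List.foldl_add, sum_hundred_add]
  have h := congrArg (List.map (fun x => PySem.List.pyGetD scaf_lengths (PySem.Int.truncdiv x 2) 0)) (pairs_snd path)
  simp only [List.map_map, Function.comp_def] at h
  rw [h, pairs_length path, PySem.Int.floordiv_eq_ediv_of_pos (by norm_num)]
  have hd : ((path.length / 2 : Nat) : Int) = (path.length : Int) / 2 := by
    omega
  rw [hd]
  ring

-- The two outer loops agree step by step.
lemma foldl_eq (paths : List (List Int)) (scaf_lengths : List Int) (acc : List Int) :
    paths.foldl (fun super_scaffold_lengths path =>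
      let l := (path.length : Int)
      let length_super_scaffold :=
        if PySem.Int.mod l 2 = 0 then linear_get_length path scaf_lengths
        else cycle_get_length path scaf_lengths
      super_scaffold_lengths ++ [length_super_scaffold]) acc
    = paths.foldl (fun out path =>
        let total := (pvZipPairs path).foldl
          (fun total p => total + (100 + PySem.List.pyGetD scaf_lengths (PySem.Int.truncdiv p.2 2) 0))
          (-100)
        out ++ [total]) acc := by
  induction paths generalizing acc with
  | nil => rfl
  | cons p ps ih =>
    simp only [List.foldl_cons]
    rw [body_eq p scaf_lengths, body_eq2 p scaf_lengths]
    exact ih _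

-- ===== VERDICT (by name: the statement is the Claim_ definition above) =====
theorem get_super_scaffold_length_spec : Claim_equal_get_super_scaffold_length := by
  intro paths scaf_lengths _ _
  unfold Spec_get_super_scaffold_length get_super_scaffold_length get_super_scaffold_length_alt
  exact foldl_eq paths scaf_lengths []
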